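-- pv_equiv track=rewrite | github.com/qiuxfeng1985/geecode-sublime-plugin | geecode.py | repalaceCode
-- ===== SOURCE A (Python) =====
-- def repalaceCode(code):
--     newCode = '''<br>'''
--     listCode = code.split('\n')
--     for lineCode in listCode :
--         if (len(lineCode) > 0 and lineCode[0] == '#') :
--             lineCode = '\\'+lineCode
--         newCode = newCode + lineCode + '''\n'''
--     return newCode
-- ===== SOURCE B (Python) =====
-- def repalaceCode(code):
--     parts = ['<br>']
--     at_line_start = True
--     for ch in code:
--         if at_line_start and ch == '#':
--             parts.append('\\' + ch)
--         else:
--             parts.append(ch)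
--         at_line_start = (ch == '\n')
--     parts.append('\n')
--     return ''.join(parts)
-- ===== Notes on version B (the rewrite author's own statement) =====
-- stated objective: alternative
-- what changed: A splits the text into lines and rebuilds it line by line; B makes a single left-to-right character scan with a line-start flag, inserting the escape backslash on the fly.
import Mathlib
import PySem

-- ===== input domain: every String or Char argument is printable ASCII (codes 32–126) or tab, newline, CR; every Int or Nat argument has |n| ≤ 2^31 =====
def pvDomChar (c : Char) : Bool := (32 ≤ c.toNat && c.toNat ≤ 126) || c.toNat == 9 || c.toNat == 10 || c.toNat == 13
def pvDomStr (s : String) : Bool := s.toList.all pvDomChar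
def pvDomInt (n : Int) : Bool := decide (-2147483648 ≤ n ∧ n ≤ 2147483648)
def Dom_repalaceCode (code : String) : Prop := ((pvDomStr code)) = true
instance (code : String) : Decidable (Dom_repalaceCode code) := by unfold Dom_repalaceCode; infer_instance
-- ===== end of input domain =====

-- B replaces A's split('\n')/per-line rebuild with a single character scan tracking a line-start flag (alternative decomposition, same cost).


-- ===== PORT A =====
def repalaceCode (code : String) : String :=
  let newCode := "<br>".toList
  let listCode := PySem.Chars.splitOn code.toList "\n".toList
  String.ofList (listCode.foldl (fun newCode lineCode =>
    let lineCode := if decide (lineCode.length > 0) && (PySem.List.pyGet? lineCode 0 == some '#')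
      then '\\' :: lineCode else lineCode
    newCode ++ lineCode ++ ['\n']) newCode)

-- ===== PORT B =====
def repalaceCode_alt (code : String) : String :=
  let st := code.toList.foldl (fun (st : List Char × Bool) ch =>
    ((if st.2 && ch == '#' then st.1 ++ ['\\', ch] else st.1 ++ [ch]), ch == '\n'))
    ("<br>".toList, true)
  String.ofList (st.1 ++ ['\n'])

-- ===== PRECONDITION & SPEC =====
def Spec_repalaceCode (code : String) (out : String) : Prop := out = repalaceCode_alt code
instance (code : String) (out : String) : Decidable (Spec_repalaceCode code out) := by unfold Spec_repalaceCode; infer_instance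

-- ===== CLAIM (what is proved, stated in full; the proofs are below) =====
def Claim_equal_repalaceCode : Prop := ∀ (code : String), Dom_repalaceCode code → Spec_repalaceCode code (repalaceCode code)

-- ===== LEMMAS AND PROOFS =====

-- reference splitter on '\n' (proof-side only)
def splitNL (pre : List Char) : List Char → List (List Char)
  | [] => [pre]
  | c :: rest => if c = '\n' then pre :: splitNL [] rest else splitNL (pre ++ [c]) rest

-- B's scan, as a pure recursion (proof-side only)
def scanF (b : Bool) : List Char → List Char
  | [] => []
  | c :: rest => (if b && c == '#' then ['\\', c] else [c]) ++ scanF (c == '\n') rest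

-- last line-start flag after scanning
def lastB (b : Bool) : List Char → Bool
  | [] => b
  | c :: rest => lastB (c == '\n') rest

theorem pyGet_zero_nil : PySem.List.pyGet? ([] : List Char) 0 = none := by
  simp [PySem.List.pyGet?, PySem.List.pyIdx?]

theorem isEmpty_append_singleton (pre : List Char) (c : Char) : (pre ++ [c]).isEmpty = false := by
  cases pre <;> simp

-- A's per-line escape
def escF (pre : List Char) : List Char :=
  if decide (pre.length > 0) && (PySem.List.pyGet? pre 0 == some '#') then '\\' :: pre else pre

theorem go_eq (l : List Char) : ∀ (fuel : Nat) (acc : List (List Char)) (curc : List Char),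
    l.length ≤ fuel →
    PySem.Chars.splitOn.go ['\n'] fuel l curc acc = acc.reverse ++ splitNL curc.reverse l := by
  induction l with
  | nil =>
    intro fuel acc curc _
    cases fuel <;> simp [PySem.Chars.splitOn.go, splitNL]
  | cons c rest ih =>
    intro fuel acc curc h
    cases fuel with
    | zero => simp at h
    | succ f =>
      by_cases hc : c = '\n'
      · subst hc
        simp only [PySem.Chars.splitOn.go, List.isPrefixOf]
        rw [if_pos (by simp)]
        rw [show List.drop ['\n'].length ('\n' :: rest) = rest from rfl]
        rw [ih f (curc.reverse :: acc) [] (by simpa using Nat.le_of_succ_le_succ h)]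
        simp [splitNL]
      · simp only [PySem.Chars.splitOn.go]
        rw [if_neg (by simpa [List.isPrefixOf] using fun hcc => hc hcc.symm)]
        rw [ih f acc (c :: curc) (by simpa using Nat.le_of_succ_le_succ h)]
        simp [splitNL, hc]

theorem splitOn_eq (cs : List Char) : PySem.Chars.splitOn cs ['\n'] = splitNL [] cs := by
  have := go_eq cs (cs.length + 1) [] [] (Nat.le_succ _)
  simpa [PySem.Chars.splitOn] using this

theorem foldl_scan (cs : List Char) : ∀ (out : List Char) (b : Bool),
    cs.foldl (fun (st : List Char × Bool) ch =>
      ((if st.2 && ch == '#' then st.1 ++ ['\\', ch] else st.1 ++ [ch]), ch == '\n')) (out, b)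
    = (out ++ scanF b cs, lastB b cs) := by
  induction cs with
  | nil => intro out b; simp [scanF, lastB]
  | cons c rest ih =>
    intro out b
    simp only [List.foldl, scanF, lastB]
    rw [ih]
    by_cases h : b && c == '#' <;> simp [h]

theorem escF_append (pre : List Char) (c : Char) :
    escF (pre ++ [c]) = escF pre ++ (if pre.isEmpty && c == '#' then ['\\', c] else [c]) := by
  cases pre with
  | nil =>
    by_cases h : c = '#' <;> simp [escF, pyGet_zero_nil, h]
  | cons p ps =>
    have : (p :: ps) ++ [c] = p :: (ps ++ [c]) := rfl
    rw [this]
    by_cases h : p = '#' <;> simp [escF, h, List.isEmpty]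

theorem main_fold (cs : List Char) : ∀ (pre acc : List Char),
    (splitNL pre cs).foldl (fun newCode lineCode =>
      let lineCode := if decide (lineCode.length > 0) && (PySem.List.pyGet? lineCode 0 == some '#')
        then '\\' :: lineCode else lineCode
      newCode ++ lineCode ++ ['\n']) acc
    = acc ++ escF pre ++ scanF pre.isEmpty cs ++ ['\n'] := by
  induction cs with
  | nil =>
    intro pre acc
    simp [splitNL, scanF, escF]
  | cons c rest ih =>
    intro pre acc
    by_cases hc : c = '\n'
    · subst hc
      simp only [splitNL, if_true, List.foldl_cons]
      rw [ih [] _]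
      simp only [scanF]
      have hsh : ('\n' == '#') = false := by decide
      simp [escF, hsh, List.isEmpty]
    · simp only [splitNL, if_neg hc]
      rw [ih (pre ++ [c]) acc]
      rw [escF_append]
      have hne : (c == '\n') = false := by simp [hc]
      simp only [scanF, hne]
      rw [isEmpty_append_singleton]
      by_cases hp : pre.isEmpty <;> by_cases hh : c = '#' <;>
        simp [hp, hh, List.append_assoc]

-- ===== VERDICT (by name: the statement is the Claim_ definition above) =====
theorem repalaceCode_spec : Claim_equal_repalaceCode := by
  intro code _
  show repalaceCode code = repalaceCode_alt code
  unfold repalaceCode repalaceCode_alt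
  simp only [show "\n".toList = ['\n'] from rfl, splitOn_eq, foldl_scan, main_fold]
  simp [escF, pyGet_zero_nil]
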